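-- pv_equiv track=rewrite | github.com/dipendrasingh100/tkinter-calculator | Calculator.py | string_handel
-- ===== SOURCE A (Python) =====
-- def string_handel(string):
--     rs = string[::-1]
--     val = []
--     for i in rs:
--         if i in ["+","-","*","/"]:
--             break
--         else:
--             val.insert(0,i)
--     return "".join(val)
-- ===== SOURCE B (Python) =====
-- def string_handel(string):
--     # Record the index of the last arithmetic operator in one forward pass,
--     # then return the slice after it (whole string if there is none).
--     last = -1
--     for i, ch in enumerate(string):
--         if ch in "+-*/":
--             last = i
--     return string[last + 1:]
-- ===== Notes on version B (the rewrite author's own statement) =====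
-- stated objective: faster
-- what changed: Replaced the reverse scan with break and repeated list.insert(0, ...) by one forward pass that records the index of the last operator and returns a single slice after it.
import Mathlib
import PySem

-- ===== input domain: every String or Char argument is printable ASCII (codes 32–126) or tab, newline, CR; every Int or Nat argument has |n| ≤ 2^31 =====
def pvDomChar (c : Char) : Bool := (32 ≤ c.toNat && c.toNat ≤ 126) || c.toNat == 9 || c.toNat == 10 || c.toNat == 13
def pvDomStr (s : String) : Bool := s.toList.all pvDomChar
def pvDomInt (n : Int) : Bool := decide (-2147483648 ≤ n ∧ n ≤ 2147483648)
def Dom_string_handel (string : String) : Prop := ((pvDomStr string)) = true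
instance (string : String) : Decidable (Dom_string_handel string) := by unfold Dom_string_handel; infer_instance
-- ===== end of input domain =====

-- B replaces A's reverse scan (break at first operator, insert(0, ...)) by one forward
-- pass recording the last operator's index followed by a single slice; equal return values proved.

-- ===== PORT A =====
-- operator test of A's loop: 'i in ["+","-","*","/"]'
def pvIsOpA (c : Char) : Bool := c == '+' || c == '-' || c == '*' || c == '/'

-- the for-loop over rs with break and val.insert(0, i) (prepend)
def pvLoopA : List Char → List Char → List Char
  | [], val => val
  | c :: rest, val => if pvIsOpA c then val else pvLoopA rest (c :: val)

def string_handel (string : String) : String :=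
  -- rs = string[::-1]; exact: PySem.Str.slice? s none none (-1) = reverse
  let rs := string.toList.reverse
  -- "".join(val) of single characters is the string of those characters
  String.mk (pvLoopA rs [])

-- ===== PORT B =====
-- 'ch in "+-*/"' membership test of B's loop
def pvIsOpB (c : Char) : Bool := ('+' : Char) :: ['-', '*', '/'] |>.contains c

-- the enumerate loop: last := i whenever ch is an operator
def pvLastOp : List Char → Nat → Int → Int
  | [], _, last => last
  | c :: rest, i, last => pvLastOp rest (i + 1) (if pvIsOpB c then (i : Int) else last)

def string_handel_alt (string : String) : String :=
  let last := pvLastOp string.toList 0 (-1)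
  -- string[last+1:] with last+1 ≥ 0 always (last ≥ -1): exact = drop (last+1)
  String.mk (string.toList.drop (last + 1).toNat)

-- ===== PRECONDITION & SPEC =====
def Spec_string_handel (string : String) (out : String) : Prop := out = string_handel_alt string
instance (string : String) (out : String) : Decidable (Spec_string_handel string out) := by unfold Spec_string_handel; infer_instance

-- ===== CLAIM =====
def Claim_equal_string_handel : Prop := ∀ (string : String), Dom_string_handel string → Spec_string_handel string (string_handel string)

-- ===== LEMMAS AND PROOFS =====
lemma pvIsOp_eq (c : Char) : pvIsOpB c = pvIsOpA c := by
  simp only [pvIsOpB, pvIsOpA, List.contains_cons, List.contains_nil, Bool.or_false]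
  simp [Bool.or_assoc]

lemma pvLoopA_eq (rl : List Char) : ∀ val, pvLoopA rl val = (rl.takeWhile (fun c => !pvIsOpA c)).reverse ++ val := by
  induction rl with
  | nil => intro val; simp [pvLoopA]
  | cons c rest ih =>
    intro val
    by_cases h : pvIsOpA c
    · simp [pvLoopA, List.takeWhile, h]
    · simp [pvLoopA, List.takeWhile, h, ih]

lemma pvLastOp_lt (xs : List Char) : ∀ (i : Nat) (last : Int), last < i → pvLastOp xs i last < i + xs.length := by
  induction xs with
  | nil => intro i last h; simpa [pvLastOp] using h
  | cons c rest ih =>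
    intro i last h
    have h1 := ih (i + 1) (if pvIsOpB c then (i : Int) else last)
      (by split <;> push_cast <;> omega)
    simp only [pvLastOp, List.length_cons]
    push_cast at h1 ⊢
    omega

lemma pvLastOp_snoc (xs : List Char) (c : Char) : ∀ (i : Nat) (last : Int),
    pvLastOp (xs ++ [c]) i last = if pvIsOpB c then ((i + xs.length : Nat) : Int) else pvLastOp xs i last := by
  induction xs with
  | nil => intro i last; by_cases h : pvIsOpB c <;> simp [pvLastOp, h]
  | cons x rest ih =>
    intro i last
    by_cases h : pvIsOpB c <;>
      simp [pvLastOp, ih, h] <;> push_cast <;> ring_nf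

lemma main_eq (l : List Char) :
    (l.reverse.takeWhile (fun c => !pvIsOpA c)).reverse = l.drop (pvLastOp l 0 (-1) + 1).toNat := by
  induction l using List.reverseRecOn with
  | nil => simp [pvLastOp]
  | append_singleton l c ih =>
    rw [pvLastOp_snoc, pvIsOp_eq]
    cases hb : pvIsOpA c with
    | true =>
      rw [if_pos rfl]
      have ht : (((0 + l.length : Nat) : Int) + 1).toNat = l.length + 1 := by push_cast; omega
      rw [ht, List.reverse_append, List.drop_eq_nil_of_le (by simp)]
      simp [List.takeWhile_cons, hb]
    | false =>
      rw [if_neg (by simp)]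
      have hlt : pvLastOp l 0 (-1) < (l.length : Int) := by
        simpa using pvLastOp_lt l 0 (-1) (by norm_num)
      have hk : (pvLastOp l 0 (-1) + 1).toNat ≤ l.length := by omega
      have hr : (l ++ [c]).reverse = c :: l.reverse := by simp
      rw [hr, List.takeWhile_cons, if_pos (by simp [hb]), List.reverse_cons, ih,
        List.drop_append_of_le_length hk]

-- ===== VERDICT =====
theorem string_handel_spec : Claim_equal_string_handel := by
  intro s _
  show string_handel s = string_handel_alt s
  simp only [string_handel, string_handel_alt]
  rw [pvLoopA_eq]
  simp [main_eq]
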